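-- pv_equiv track=rewrite | github.com/Nightknight3000/Verity-Triumph-Instructor | verity_triumph.py | get_missing_shapes
-- ===== SOURCE A (Python) =====
-- _VALID_SYMBOLS = ["s", "t", "c"]
--
-- def get_missing_shapes(inputs: dict[str, str]) -> str:
--     found_shapes = ""
--     for v in inputs.values():
--         found_shapes += v
--
--     missing_shapes = ""
--     for s in _VALID_SYMBOLS:
--         while found_shapes.count(s) < 2:
--             found_shapes += s
--             missing_shapes += s
--     return missing_shapes
-- ===== SOURCE B (Python) =====
-- def get_missing_shapes(inputs: dict[str, str]) -> str:
--     # Subtractive approach: start from the full requirement 'ssttcc' (two of each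
--     # valid symbol, in order) and delete one pending copy for every matching
--     # character seen; whatever survives is exactly what is still missing.
--     need = list("ssttcc")
--     for v in inputs.values():
--         for ch in v:
--             if ch in need:
--                 need.remove(ch)
--     return "".join(need)
-- ===== Notes on version B (the rewrite author's own statement) =====
-- stated objective: alternative
-- what changed: Instead of counting each symbol and emitting copies until the count reaches 2, B starts from the full requirement list of two copies of each valid symbol in order and deletes one pending copy per matching input character in a single pass; the surviving list is the answer.
import Mathlib
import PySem

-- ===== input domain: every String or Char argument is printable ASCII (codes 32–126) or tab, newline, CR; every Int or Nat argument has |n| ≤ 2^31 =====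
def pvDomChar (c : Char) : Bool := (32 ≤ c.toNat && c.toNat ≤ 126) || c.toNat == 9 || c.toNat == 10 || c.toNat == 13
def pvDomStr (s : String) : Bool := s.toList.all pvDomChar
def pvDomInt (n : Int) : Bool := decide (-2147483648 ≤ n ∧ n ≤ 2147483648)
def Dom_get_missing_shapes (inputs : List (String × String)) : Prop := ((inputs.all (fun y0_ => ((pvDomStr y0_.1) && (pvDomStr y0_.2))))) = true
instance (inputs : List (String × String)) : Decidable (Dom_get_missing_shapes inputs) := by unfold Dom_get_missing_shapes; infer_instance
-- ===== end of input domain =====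

-- B replaces A's count-and-emit while loops with a subtractive single pass:
-- start from the full requirement ['s','s','t','t','c','c'] and delete one pending
-- copy per matching input character; what survives is the missing string.

-- ===== PORT A =====
-- _VALID_SYMBOLS; the symbols are single characters, so found_shapes.count(s) is a char count
def pvValidSymbols : List Char := ['s', 't', 'c']

-- 'while found_shapes.count(s) < 2: found_shapes += s; missing_shapes += s'
def pvWhile (s : Char) (found missing : List Char) : List Char × List Char :=
  if found.count s < 2 then pvWhile s (found ++ [s]) (missing ++ [s]) else (found, missing)
termination_by 2 - found.count s
decreasing_by simp_all [List.count_append]; omega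

def get_missing_shapes (inputs : List (String × String)) : String :=
  -- for v in inputs.values(): found_shapes += v
  let found := (PySem.Dict.ofList inputs).values.foldl (fun acc v => acc ++ v.toList) []
  -- for s in _VALID_SYMBOLS: while …
  let st := pvValidSymbols.foldl (fun (st : List Char × List Char) s => pvWhile s st.1 st.2) (found, [])
  String.ofList st.2

-- ===== PORT B =====
-- 'if ch in need: need.remove(ch)' — Python list.remove deletes the FIRST
-- occurrence, exactly List.erase when the element is present (exact here).
def pvStep (need : List Char) (ch : Char) : List Char :=
  if need.contains ch then need.erase ch else need

def get_missing_shapes_alt (inputs : List (String × String)) : String :=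
  -- need = list("ssttcc"); for v in inputs.values(): for ch in v: …
  let need := (PySem.Dict.ofList inputs).values.foldl
    (fun need v => v.toList.foldl pvStep need) ['s', 's', 't', 't', 'c', 'c']
  String.ofList need

-- ===== PRECONDITION & SPEC =====
def Spec_get_missing_shapes (inputs : List (String × String)) (out : String) : Prop := out = get_missing_shapes_alt inputs
instance (inputs : List (String × String)) (out : String) : Decidable (Spec_get_missing_shapes inputs out) := by unfold Spec_get_missing_shapes; infer_instance

-- ===== CLAIM (what is proved, stated in full; the proofs are below) =====
def Claim_equal_get_missing_shapes : Prop := ∀ (inputs : List (String × String)), Dom_get_missing_shapes inputs → Spec_get_missing_shapes inputs (get_missing_shapes inputs)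

-- ===== LEMMAS AND PROOFS =====

-- A's concatenation loop builds exactly the flattened list of the values
theorem pv_foldl_append (l : List String) (acc : List Char) :
    l.foldl (fun acc v => acc ++ v.toList) acc = acc ++ (l.map String.toList).flatten := by
  induction l generalizing acc with
  | nil => simp
  | cons x xs ih => simp [ih, List.append_assoc]

-- closed form of A's while loop
theorem pvWhile_eq (s : Char) (found missing : List Char) :
    pvWhile s found missing =
      (found ++ List.replicate (2 - found.count s) s,
       missing ++ List.replicate (2 - found.count s) s) := by
  by_cases h : found.count s < 2
  · rw [pvWhile]
    simp only [h, if_pos]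
    rw [pvWhile_eq]
    have hc : (found ++ [s]).count s = found.count s + 1 := by simp [List.count_append]
    rw [hc]
    have h2 : 2 - found.count s = (2 - (found.count s + 1)) + 1 := by omega
    rw [h2, List.replicate_succ]
    simp [List.append_assoc]
  · rw [pvWhile]
    simp only [h, if_neg, not_false_iff]
    have : 2 - found.count s = 0 := by omega
    simp [this]
termination_by 2 - found.count s
decreasing_by simp_all [List.count_append]; omega

-- appending copies of a different symbol does not change a count
theorem pv_count_append_ne (l : List Char) (k : Nat) (a b : Char) (h : a ≠ b) :
    (l ++ List.replicate k b).count a = l.count a := by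
  simp [List.count_append, List.count_replicate]
  intro hba; exact absurd hba.symm h

-- one B step on a need list of the invariant shape
theorem pvStep_tri (a b c : Nat) (ch : Char) :
    pvStep (List.replicate a 's' ++ List.replicate b 't' ++ List.replicate c 'c') ch =
      List.replicate (a - if ch = 's' then 1 else 0) 's' ++
      List.replicate (b - if ch = 't' then 1 else 0) 't' ++
      List.replicate (c - if ch = 'c' then 1 else 0) 'c' := by
  unfold pvStep
  by_cases hs : ch = 's'
  · subst hs
    cases a with
    | zero => simp [List.mem_replicate]
    | succ n =>
      have hm : ('s' : Char) ∈ List.replicate (n+1) 's' ++ List.replicate b 't' ++ List.replicate c 'c' := by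
        simp [List.mem_replicate]
      simp only [List.contains_eq_mem, hm, decide_true, if_true, if_pos rfl]
      rw [List.append_assoc, List.erase_append_left _ (by simp [List.mem_replicate]), List.replicate_succ,
        List.erase_cons_head]
      simp [List.append_assoc]
  · by_cases ht : ch = 't'
    · subst ht
      cases b with
      | zero => simp [List.mem_replicate, hs, Ne.symm hs]
      | succ n =>
        have hm : ('t' : Char) ∈ List.replicate a 's' ++ List.replicate (n+1) 't' ++ List.replicate c 'c' := by
          simp [List.mem_replicate]
        simp only [List.contains_eq_mem, hm, decide_true, if_true, if_pos rfl, if_neg hs]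
        rw [List.append_assoc, List.erase_append_right _ (by simp [List.mem_replicate]),
          List.erase_append_left _ (by simp [List.mem_replicate]), List.replicate_succ, List.erase_cons_head]
        simp [hs, List.append_assoc]
    · by_cases hc : ch = 'c'
      · subst hc
        cases c with
        | zero => simp [List.mem_replicate, hs, ht, Ne.symm hs, Ne.symm ht]
        | succ n =>
          have hm : ('c' : Char) ∈ List.replicate a 's' ++ List.replicate b 't' ++ List.replicate (n+1) 'c' := by
            simp [List.mem_replicate]
          simp only [List.contains_eq_mem, hm, decide_true, if_true, if_pos rfl, if_neg hs, if_neg ht]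
          rw [List.append_assoc, List.erase_append_right _ (by simp [List.mem_replicate]),
            List.erase_append_right _ (by simp [List.mem_replicate]),
            List.replicate_succ, List.erase_cons_head]
          simp [List.append_assoc]
      · have : ch ∉ List.replicate a 's' ++ List.replicate b 't' ++ List.replicate c 'c' := by
          simp [List.mem_replicate, hs, ht, hc]
        simp [List.contains_eq_mem, this, hs, ht, hc]

-- B's whole pass on a need list of the invariant shape
theorem pvFold_tri (J : List Char) (a b c : Nat) :
    J.foldl pvStep (List.replicate a 's' ++ List.replicate b 't' ++ List.replicate c 'c') =
      List.replicate (a - J.count 's') 's' ++ List.replicate (b - J.count 't') 't' ++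
      List.replicate (c - J.count 'c') 'c' := by
  induction J generalizing a b c with
  | nil => simp
  | cons x xs ih =>
    rw [List.foldl_cons, pvStep_tri, ih]
    have key : ∀ (n : Nat) (y : Char), (n - if x = y then 1 else 0) - xs.count y = n - (x :: xs).count y := by
      intro n y
      by_cases h : x = y
      · subst h; simp [List.count_cons]; omega
      · simp [List.count_cons, h, fun hh : y = x => h hh.symm]
    rw [key, key, key]

-- the nested per-value folds are one fold over the flattened values
theorem pv_foldl_nested (L : List String) (init : List Char) :
    L.foldl (fun need v => v.toList.foldl pvStep need) init =
      ((L.map String.toList).flatten).foldl pvStep init := by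
  induction L generalizing init with
  | nil => simp
  | cons x xs ih => simp [ih, List.foldl_append]

-- ===== VERDICT (by name: the statement is the Claim_ definition above) =====
theorem get_missing_shapes_spec : Claim_equal_get_missing_shapes := by
  intro inputs _
  unfold Spec_get_missing_shapes get_missing_shapes get_missing_shapes_alt
  simp only [pv_foldl_append, List.nil_append, pv_foldl_nested]
  set J := (((PySem.Dict.ofList inputs).values.map String.toList).flatten) with hJ
  simp only [pvValidSymbols, List.foldl_cons, List.foldl_nil]
  rw [pvWhile_eq, pvWhile_eq, pvWhile_eq]
  have hB : (['s','s','t','t','c','c'] : List Char) =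
      List.replicate 2 's' ++ List.replicate 2 't' ++ List.replicate 2 'c' := by decide
  rw [hB, pvFold_tri]
  simp only [pv_count_append_ne _ _ 't' 's' (by decide), pv_count_append_ne _ _ 'c' 's' (by decide),
    pv_count_append_ne _ _ 'c' 't' (by decide)]
  simp [List.append_assoc]
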